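-- pv_equiv track=rewrite | github.com/poeticcode01/ds_algo | leetcode_blind_75/array/min_stops.py | find_max_fuel_within_reachable_stations
-- ===== SOURCE A (Python) =====
-- def find_max_fuel_within_reachable_stations(last_stop,cur_pos,cur_fuel,stations):
--
--     max_fuel = cur_fuel
--     new_pos =  cur_pos
--     flag = False
--     while cur_pos < len(stations) and cur_fuel >= (stations[cur_pos][0]-last_stop):
--         flag = True
--         new_fuel =  (cur_fuel - (stations[cur_pos][0] - last_stop)) + stations[cur_pos][1]
--         if new_fuel >= max_fuel:
--             max_fuel =  new_fuel
--             new_pos = cur_pos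
--         cur_pos +=1
--     return flag,new_pos, max_fuel
-- ===== SOURCE B (Python) =====
-- def find_max_fuel_within_reachable_stations(last_stop, cur_pos, cur_fuel, stations):
--     # Key algebraic fact: the fuel after refuelling at station i is
--     #   base + gain_i  with  base = cur_fuel + last_stop  and  gain_i = stations[i][1] - stations[i][0],
--     # which does not depend on the scan state. So the best stop is simply the LAST
--     # argmax of gain over the contiguous reachable prefix, and it replaces the
--     # baseline iff base + max_gain >= cur_fuel.
--     base = cur_fuel + last_stop
--     end = cur_pos
--     while end < len(stations) and stations[end][0] <= base:
--         end += 1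
--     if end == cur_pos:
--         return False, cur_pos, cur_fuel
--     gains = [stations[i][1] - stations[i][0] for i in range(cur_pos, end)]
--     g = max(gains)
--     if base + g >= cur_fuel:
--         pos = end - 1 - gains[::-1].index(g)
--         return True, pos, base + g
--     return True, cur_pos, cur_fuel
-- ===== Notes on version B (the rewrite author's own statement) =====
-- stated objective: alternative
-- what changed: Replaces A's fused scan with running-max/flag/new_pos state by an algebraic reformulation: since the post-refuel fuel at station i is (cur_fuel+last_stop) + (stations[i][1]-stations[i][0]) independently of the scan state, B first finds the reachable-prefix boundary, then builds the list of per-station gains, takes its library max, recovers the last argmax with a reversed-list .index, and compares against the baseline once at the end.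
import Mathlib
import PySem

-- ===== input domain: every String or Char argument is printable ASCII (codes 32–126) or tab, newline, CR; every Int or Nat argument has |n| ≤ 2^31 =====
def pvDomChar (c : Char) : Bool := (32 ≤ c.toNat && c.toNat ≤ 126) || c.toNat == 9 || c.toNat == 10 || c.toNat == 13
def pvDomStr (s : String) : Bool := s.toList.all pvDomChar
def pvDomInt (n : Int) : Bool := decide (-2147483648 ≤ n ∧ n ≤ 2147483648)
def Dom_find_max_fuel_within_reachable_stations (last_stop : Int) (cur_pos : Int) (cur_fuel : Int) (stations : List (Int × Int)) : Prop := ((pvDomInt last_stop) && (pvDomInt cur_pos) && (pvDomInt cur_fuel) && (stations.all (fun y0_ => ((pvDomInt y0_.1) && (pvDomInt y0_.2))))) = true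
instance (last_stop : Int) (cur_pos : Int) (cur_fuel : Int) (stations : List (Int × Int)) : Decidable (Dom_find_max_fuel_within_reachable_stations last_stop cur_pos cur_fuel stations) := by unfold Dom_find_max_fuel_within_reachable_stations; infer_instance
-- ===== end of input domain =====

-- B replaces A's fused running-max scan by a boundary scan plus a gain-list max and a
-- reversed-index last-argmax (objective: alternative, same O(n) cost); equal on Pre_.

-- ===== PORT A =====
-- the while loop of A: state (cur_pos, flag, max_fuel, new_pos); Nat fuel bounds the iterations
def pvALoop (last_stop : Int) (cur_fuel : Int) (stations : List (Int × Int)) :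
    Nat → Int → Bool → Int → Int → Bool × Int × Int
  | 0, _, flag, max_fuel, new_pos => (flag, new_pos, max_fuel)
  | Nat.succ k, cur_pos, flag, max_fuel, new_pos =>
    if cur_pos < (stations.length : Int) then
      match PySem.List.pyGet? stations cur_pos with
      | none => (false, 0, 0)  -- IndexError in Python; excluded by Pre_
      | some st =>
        if cur_fuel ≥ st.1 - last_stop then
          if (cur_fuel - (st.1 - last_stop)) + st.2 ≥ max_fuel then
            pvALoop last_stop cur_fuel stations k (cur_pos + 1) true
              ((cur_fuel - (st.1 - last_stop)) + st.2) cur_pos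
          else
            pvALoop last_stop cur_fuel stations k (cur_pos + 1) true max_fuel new_pos
        else (flag, new_pos, max_fuel)
    else (flag, new_pos, max_fuel)

def find_max_fuel_within_reachable_stations (last_stop : Int) (cur_pos : Int) (cur_fuel : Int) (stations : List (Int × Int)) : Bool × Int × Int :=
  pvALoop last_stop cur_fuel stations ((stations.length : Int) - cur_pos).toNat cur_pos false cur_fuel cur_pos

-- ===== PORT B =====
-- B's first pass: boundary of the contiguous reachable prefix (condition stations[end][0] <= base)
def pvBEnd (base : Int) (stations : List (Int × Int)) : Nat → Int → Int
  | 0, e => e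
  | Nat.succ k, e =>
    if e < (stations.length : Int) then
      match PySem.List.pyGet? stations e with
      | none => e  -- IndexError in Python; excluded by Pre_
      | some st =>
        if st.1 ≤ base then pvBEnd base stations k (e + 1)
        else e
    else e

def find_max_fuel_within_reachable_stations_alt (last_stop : Int) (cur_pos : Int) (cur_fuel : Int) (stations : List (Int × Int)) : Bool × Int × Int :=
  let base := cur_fuel + last_stop
  let e := pvBEnd base stations ((stations.length : Int) - cur_pos).toNat cur_pos
  if e = cur_pos then (false, cur_pos, cur_fuel)
  else
    let gains := (PySem.List.pyRange cur_pos e 1).map (fun i =>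
      let st := PySem.List.pyGetD stations i (0, 0)
      st.2 - st.1)
    -- max(gains): gains is nonempty here, so Python's max never raises; the default is unused
    let g := (PySem.List.max? gains (fun x => x)).getD 0
    if base + g ≥ cur_fuel then
      -- gains[::-1] is List.reverse (PySem.List.slice?_none_none_neg_one); .index finds g (g ∈ gains)
      let pos := e - 1 - (((PySem.List.index? gains.reverse g).getD 0 : Nat) : Int)
      (true, pos, base + g)
    else (true, cur_pos, cur_fuel)

-- ===== PRECONDITION & SPEC =====
-- Pre_ excludes exactly cur_pos < -len(stations), where Python A (and Python B alike)
-- raises IndexError on the first stations[cur_pos] access.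
def Pre_find_max_fuel_within_reachable_stations (last_stop : Int) (cur_pos : Int) (cur_fuel : Int) (stations : List (Int × Int)) : Prop :=
  -(stations.length : Int) ≤ cur_pos
instance (last_stop : Int) (cur_pos : Int) (cur_fuel : Int) (stations : List (Int × Int)) : Decidable (Pre_find_max_fuel_within_reachable_stations last_stop cur_pos cur_fuel stations) := by unfold Pre_find_max_fuel_within_reachable_stations; infer_instance

def pvWitness_find_max_fuel_within_reachable_stations : Int × Int × Int × (List (Int × Int)) := (0, 0, 10, [(1, 5), (3, 2)])

def Spec_find_max_fuel_within_reachable_stations (last_stop : Int) (cur_pos : Int) (cur_fuel : Int) (stations : List (Int × Int)) (out : Bool × Int × Int) : Prop := out = find_max_fuel_within_reachable_stations_alt last_stop cur_pos cur_fuel stations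
instance (last_stop : Int) (cur_pos : Int) (cur_fuel : Int) (stations : List (Int × Int)) (out : Bool × Int × Int) : Decidable (Spec_find_max_fuel_within_reachable_stations last_stop cur_pos cur_fuel stations out) := by unfold Spec_find_max_fuel_within_reachable_stations; infer_instance

-- ===== CLAIM (what is proved, stated in full; the proofs are below) =====
def Claim_equal_find_max_fuel_within_reachable_stations : Prop := ∀ (last_stop : Int) (cur_pos : Int) (cur_fuel : Int) (stations : List (Int × Int)), Dom_find_max_fuel_within_reachable_stations last_stop cur_pos cur_fuel stations → Pre_find_max_fuel_within_reachable_stations last_stop cur_pos cur_fuel stations → Spec_find_max_fuel_within_reachable_stations last_stop cur_pos cur_fuel stations (find_max_fuel_within_reachable_stations last_stop cur_pos cur_fuel stations)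

-- ===== LEMMAS AND PROOFS =====

-- total step of A's update rule as a fold step on (fuel, index) pairs
def pvStep (a b : Int × Int) : Int × Int :=
  if a.1 < b.1 ∨ (¬ b.1 < a.1 ∧ a.2 < b.2) then b else a

-- max of a nonempty gains list, as B computes it through PySem.List.max?
def pvM (gs : List Int) : Int :=
  match gs with
  | [] => 0
  | x :: t => t.foldl max x

-- last-argmax offset from the right, as B computes it through the reversed .index
def pvJ (gs : List Int) : Nat := (PySem.List.index? gs.reverse (pvM gs)).getD 0

theorem pvALoop_succ (last_stop : Int) (cur_fuel : Int) (stations : List (Int × Int))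
    (k : Nat) (p : Int) (flag : Bool) (m np : Int) :
    pvALoop last_stop cur_fuel stations (k + 1) p flag m np =
      if p < (stations.length : Int) then
        match PySem.List.pyGet? stations p with
        | none => (false, 0, 0)
        | some st =>
          if cur_fuel ≥ st.1 - last_stop then
            if (cur_fuel - (st.1 - last_stop)) + st.2 ≥ m then
              pvALoop last_stop cur_fuel stations k (p + 1) true
                ((cur_fuel - (st.1 - last_stop)) + st.2) p
            else pvALoop last_stop cur_fuel stations k (p + 1) true m np
          else (flag, np, m)
      else (flag, np, m) := rfl

theorem pvBEnd_succ (base : Int) (stations : List (Int × Int)) (k : Nat) (p : Int) :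
    pvBEnd base stations (k + 1) p =
      if p < (stations.length : Int) then
        match PySem.List.pyGet? stations p with
        | none => p
        | some st =>
          if st.1 ≤ base then pvBEnd base stations k (p + 1)
          else p
      else p := rfl

theorem pvStepEq (m np c p : Int) (h : np ≤ p) :
    pvStep (m, np) (c, p) = if c ≥ m then (c, p) else (m, np) := by
  unfold pvStep
  split_ifs <;> simp_all [Prod.ext_iff] <;> omega

theorem pvBEnd_le (base : Int) (stations : List (Int × Int)) :
    ∀ (k : Nat) (p : Int), p ≤ pvBEnd base stations k p := by
  intro k
  induction k with
  | zero => intro p; exact le_refl p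
  | succ k ih =>
    intro p
    rw [pvBEnd_succ]
    split
    · split
      · exact le_refl p
      · split_ifs with hr
        · exact le_trans (by omega : p ≤ p + 1) (ih (p + 1))
        · exact le_refl p
    · exact le_refl p

theorem pvLoopEq (last_stop cur_fuel : Int) (stations : List (Int × Int)) :
    ∀ (k : Nat) (p : Int) (flag : Bool) (m np : Int),
      np ≤ p → -(stations.length : Int) ≤ p → (stations.length : Int) ≤ p + (k : Int) →
      pvALoop last_stop cur_fuel stations k p flag m np =
        ((flag || decide (p < pvBEnd (cur_fuel + last_stop) stations k p)),
          (let r := ((PySem.List.pyRange p (pvBEnd (cur_fuel + last_stop) stations k p) 1).map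
              (fun i =>
                let st := PySem.List.pyGetD stations i (0, 0)
                ((cur_fuel - (st.1 - last_stop)) + st.2, i))).foldl pvStep (m, np)
           (r.2, r.1))) := by
  intro k
  induction k with
  | zero =>
    intro p flag m np hnp hlo hhi
    simp [pvALoop, pvBEnd, PySem.List.pyRange_one_eq_nil (le_refl p)]
  | succ k ih =>
    intro p flag m np hnp hlo hhi
    by_cases hp : p < (stations.length : Int)
    · cases h : PySem.List.pyGet? stations p with
      | none =>
        exfalso
        rw [PySem.List.pyGet?_eq_none_iff] at h
        exact h ⟨by omega, by omega⟩
      | some st =>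
        have hA : pvALoop last_stop cur_fuel stations (k + 1) p flag m np =
            (if cur_fuel ≥ st.1 - last_stop then
              (if (cur_fuel - (st.1 - last_stop)) + st.2 ≥ m then
                pvALoop last_stop cur_fuel stations k (p + 1) true
                  ((cur_fuel - (st.1 - last_stop)) + st.2) p
              else pvALoop last_stop cur_fuel stations k (p + 1) true m np)
            else (flag, np, m)) := by
          rw [pvALoop_succ, if_pos hp, h]
        have hBE : pvBEnd (cur_fuel + last_stop) stations (k + 1) p =
            (if st.1 ≤ cur_fuel + last_stop then pvBEnd (cur_fuel + last_stop) stations k (p + 1)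
             else p) := by
          rw [pvBEnd_succ, if_pos hp, h]
        have hGetD : PySem.List.pyGetD stations p (0, 0) = st := by
          simp [PySem.List.pyGetD, h]
        by_cases hr : cur_fuel ≥ st.1 - last_stop
        · rw [hA, if_pos hr, hBE, if_pos (by omega : st.1 ≤ cur_fuel + last_stop)]
          have hple : p + 1 ≤ pvBEnd (cur_fuel + last_stop) stations k (p + 1) :=
            pvBEnd_le (cur_fuel + last_stop) stations k (p + 1)
          rw [PySem.List.pyRange_one_cons (by omega :
            p < pvBEnd (cur_fuel + last_stop) stations k (p + 1))]
          simp only [List.map_cons, List.foldl_cons, hGetD]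
          rw [pvStepEq m np ((cur_fuel - (st.1 - last_stop)) + st.2) p hnp]
          have hdec : decide (p < pvBEnd (cur_fuel + last_stop) stations k (p + 1)) = true := by
            simp only [decide_eq_true_eq]; omega
          by_cases hge : (cur_fuel - (st.1 - last_stop)) + st.2 ≥ m
          · rw [if_pos hge,
              ih (p + 1) true ((cur_fuel - (st.1 - last_stop)) + st.2) p (by omega) (by omega) (by omega)]
            simp [hdec, hge]
          · rw [if_neg hge, ih (p + 1) true m np (by omega) (by omega) (by omega)]
            simp [hdec, hge]
        · rw [hA, if_neg hr, hBE, if_neg (by omega : ¬ st.1 ≤ cur_fuel + last_stop)]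
          simp [PySem.List.pyRange_one_eq_nil (le_refl p)]
    · have hA : pvALoop last_stop cur_fuel stations (k + 1) p flag m np = (flag, np, m) := by
        rw [pvALoop_succ, if_neg hp]
      have hBE : pvBEnd (cur_fuel + last_stop) stations (k + 1) p = p := by
        rw [pvBEnd_succ, if_neg hp]
      rw [hA, hBE]
      simp [PySem.List.pyRange_one_eq_nil (le_refl p)]

-- appending one gain on the right: new max
theorem pvM_append (gs : List Int) (x y : Int) :
    pvM ((y :: gs) ++ [x]) = max (pvM (y :: gs)) x := by
  simp [pvM, List.foldl_append]

-- component forms of A's step used to evaluate the fold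
theorem pvStep_take (a1 a2 b1 b2 : Int) (h1 : a1 ≤ b1) (h2 : a2 < b2) :
    pvStep (a1, a2) (b1, b2) = (b1, b2) := by
  unfold pvStep; dsimp only; rw [if_pos (Or.inr ⟨by omega, h2⟩)]

theorem pvStep_keep (a1 a2 b1 b2 : Int) (h : b1 < a1) :
    pvStep (a1, a2) (b1, b2) = (a1, a2) := by
  unfold pvStep; dsimp only; rw [if_neg (by rintro (h1 | ⟨h2, h3⟩) <;> omega)]

-- the fold of A's step over the candidate pairs equals B's max / last-argmax closed form
theorem pvCandEq (G : Int → Int) (base cf : Int) :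
    ∀ (n : Nat) (p : Int),
      (((PySem.List.pyRange p (p + 1 + (n : Int)) 1).map (fun i => (base + G i, i))).foldl
          pvStep (cf, p)) =
        (if base + pvM ((PySem.List.pyRange p (p + 1 + (n : Int)) 1).map G) ≥ cf then
          (base + pvM ((PySem.List.pyRange p (p + 1 + (n : Int)) 1).map G),
            p + (n : Int) - (pvJ ((PySem.List.pyRange p (p + 1 + (n : Int)) 1).map G) : Int))
        else (cf, p)) := by
  intro n
  induction n with
  | zero =>
    intro p
    rw [show p + 1 + ((0 : Nat) : Int) = p + 1 by push_cast; ring,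
      PySem.List.pyRange_one_singleton]
    simp only [List.map_cons, List.map_nil, List.foldl_cons, List.foldl_nil, pvM, pvJ,
      List.reverse_singleton, PySem.List.index?_cons_self, Option.getD_some]
    unfold pvStep
    split_ifs <;> simp_all [Prod.ext_iff] <;> omega
  | succ n ih =>
    intro p
    have hsplit : PySem.List.pyRange p (p + 1 + ((n + 1 : Nat) : Int)) 1 =
        PySem.List.pyRange p (p + 1 + (n : Int)) 1 ++ [p + 1 + (n : Int)] := by
      rw [show p + 1 + ((n + 1 : Nat) : Int) = (p + 1 + (n : Int)) + 1 by push_cast; ring]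
      exact PySem.List.pyRange_one_succ_right (by omega)
    rw [hsplit]
    simp only [List.map_append, List.map_cons, List.map_nil, List.foldl_append,
      List.foldl_cons, List.foldl_nil]
    rw [ih p]
    set x := G (p + 1 + (n : Int)) with hx
    set gs := (PySem.List.pyRange p (p + 1 + (n : Int)) 1).map G with hgs
    obtain ⟨y, t, hyt⟩ : ∃ y t, gs = y :: t := by
      rw [hgs, PySem.List.pyRange_one_cons (by omega : p < p + 1 + (n : Int)), List.map_cons]
      exact ⟨_, _, rfl⟩
    have hmax_eq : PySem.List.max? gs (fun y => y) = some (pvM gs) := by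
      rw [hyt, PySem.List.max?_id_cons]; rfl
    have hM_mem : pvM gs ∈ gs := PySem.List.max?_mem hmax_eq
    have hJ_some : PySem.List.index? gs.reverse (pvM gs) = some (pvJ gs) := by
      cases h : PySem.List.index? gs.reverse (pvM gs) with
      | none =>
        rw [PySem.List.index?_eq_none_iff] at h
        exact absurd (List.mem_reverse.mpr hM_mem) h
      | some j => unfold pvJ; rw [h]; exact rfl
    have hM' : pvM (gs ++ [x]) = max (pvM gs) x := by rw [hyt]; exact pvM_append t x y
    have hrev : (gs ++ [x]).reverse = x :: gs.reverse := by simp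
    by_cases hxM : pvM gs ≤ x
    · have hMx : pvM (gs ++ [x]) = x := by rw [hM']; omega
      have hJ' : ((pvJ (gs ++ [x]) : Nat) : Int) = 0 := by
        unfold pvJ; rw [hrev, hMx, PySem.List.index?_cons_self]; rfl
      rw [hMx]
      by_cases hge : base + pvM gs ≥ cf
      · rw [if_pos hge, if_pos (show base + x ≥ cf by omega),
          pvStep_take _ _ _ _ (by omega) (by omega)]
        simp only [Prod.mk.injEq, true_and]
        omega
      · rw [if_neg hge]
        by_cases hge2 : base + x ≥ cf
        · rw [if_pos hge2, pvStep_take _ _ _ _ (by omega) (by omega)]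
          simp only [Prod.mk.injEq, true_and]
          omega
        · rw [if_neg hge2, pvStep_keep _ _ _ _ (by omega)]
    · have hMx : pvM (gs ++ [x]) = pvM gs := by rw [hM']; omega
      have hJ' : ((pvJ (gs ++ [x]) : Nat) : Int) = ((pvJ gs : Nat) : Int) + 1 := by
        unfold pvJ
        rw [hrev, hMx, PySem.List.index?_cons_of_ne gs.reverse (show x ≠ pvM gs by omega),
          hJ_some]
        simp
      rw [hMx]
      by_cases hge : base + pvM gs ≥ cf
      · rw [if_pos hge, if_pos hge, pvStep_keep _ _ _ _ (by omega)]
        simp only [Prod.mk.injEq, true_and]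
        omega
      · rw [if_neg hge, if_neg hge, pvStep_keep _ _ _ _ (by omega)]

-- ===== VERDICT (by name: the statement is the Claim_ definition above) =====
theorem find_max_fuel_within_reachable_stations_spec : Claim_equal_find_max_fuel_within_reachable_stations := by
  intro last_stop cur_pos cur_fuel stations _ hpre
  unfold Pre_find_max_fuel_within_reachable_stations at hpre
  unfold Spec_find_max_fuel_within_reachable_stations
  simp only [find_max_fuel_within_reachable_stations, find_max_fuel_within_reachable_stations_alt]
  rw [pvLoopEq last_stop cur_fuel stations ((stations.length : Int) - cur_pos).toNat cur_pos false
      cur_fuel cur_pos (le_refl _) hpre (by omega)]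
  simp only [Bool.false_or]
  set E := pvBEnd (cur_fuel + last_stop) stations ((stations.length : Int) - cur_pos).toNat cur_pos with hE
  have hle : cur_pos ≤ E := pvBEnd_le _ _ _ _
  by_cases hEq : E = cur_pos
  · rw [if_pos hEq, hEq, PySem.List.pyRange_one_eq_nil (le_refl cur_pos)]
    simp
  · rw [if_neg hEq]
    have hlt : cur_pos < E := lt_of_le_of_ne hle (fun h => hEq h.symm)
    set k := (E - cur_pos - 1).toNat with hk
    have hn : E = cur_pos + 1 + (k : Int) := by omega
    rw [hn]
    have hl : List.map (fun i =>
          ((cur_fuel - ((PySem.List.pyGetD stations i (0, 0)).1 - last_stop)) +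
            (PySem.List.pyGetD stations i (0, 0)).2, i))
        (PySem.List.pyRange cur_pos (cur_pos + 1 + (k : Int)) 1) =
        List.map (fun i =>
          (cur_fuel + last_stop +
            ((PySem.List.pyGetD stations i (0, 0)).2 - (PySem.List.pyGetD stations i (0, 0)).1),
            i))
        (PySem.List.pyRange cur_pos (cur_pos + 1 + (k : Int)) 1) :=
      List.map_congr_left (fun i _ => by simp only [Prod.mk.injEq]; exact ⟨by ring, trivial⟩)
    rw [hl]
    have hCE := pvCandEq
      (fun i => (PySem.List.pyGetD stations i (0, 0)).2 - (PySem.List.pyGetD stations i (0, 0)).1)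
      (cur_fuel + last_stop) cur_fuel k cur_pos
    rw [hCE]
    rw [PySem.List.pyRange_one_cons (show cur_pos < cur_pos + 1 + (k : Int) by omega),
      List.map_cons]
    have hmaxgen : ∀ (y : Int) (t : List Int),
        (PySem.List.max? (y :: t) (fun x => x)).getD 0 = pvM (y :: t) := by
      intro y t; rw [PySem.List.max?_id_cons]; rfl
    rw [hmaxgen]
    have hJdef : ∀ L : List Int,
        (PySem.List.index? L.reverse (pvM L)).getD 0 = pvJ L := fun _ => rfl
    rw [hJdef]
    have hflag : decide (cur_pos < cur_pos + 1 + (k : Int)) = true := by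
      simp only [decide_eq_true_eq]; omega
    split_ifs with hge
    · simp only [hflag, Prod.mk.injEq, true_and, and_true]
      omega
    · simp only [hflag]
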